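-- pv_equiv track=rewrite | github.com/serenayan/shakespeare | HMM.py | count_observations
-- ===== SOURCE A (Python) =====
-- def count_observations(w, a, X, Y):
--     '''
--     y_i^j = w
--     and x_i^j = w
--     '''
--     den = 0
--     num = 0
--
--     for i in range(len(X)):
--         for j in range(len(X[i])):
--             if Y[i][j] == a:
--                 den += 1
--                 if X[i][j] == w:
--                     num += 1
--     return num, den
-- ===== SOURCE B (Python) =====
-- def count_observations(w, a, X, Y):
--     # One pass building a frequency table of (observation, state) pairs,
--     # then two aggregations over the table.
--     counts = {}
--     for xr, yr in zip(X, Y):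
--         for x, y in zip(xr, yr):
--             counts[(x, y)] = counts.get((x, y), 0) + 1
--     num = counts.get((w, a), 0)
--     den = sum(v for (_, s), v in counts.items() if s == a)
--     return num, den
-- ===== Notes on version B (the rewrite author's own statement) =====
-- stated objective: idiomatic
-- what changed: B replaces A's index-based double counting loop by building a frequency table of (observation, state) pairs over zipped rows and then reading num as one lookup and den as a sum over the table's keys with second component a.
import Mathlib
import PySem

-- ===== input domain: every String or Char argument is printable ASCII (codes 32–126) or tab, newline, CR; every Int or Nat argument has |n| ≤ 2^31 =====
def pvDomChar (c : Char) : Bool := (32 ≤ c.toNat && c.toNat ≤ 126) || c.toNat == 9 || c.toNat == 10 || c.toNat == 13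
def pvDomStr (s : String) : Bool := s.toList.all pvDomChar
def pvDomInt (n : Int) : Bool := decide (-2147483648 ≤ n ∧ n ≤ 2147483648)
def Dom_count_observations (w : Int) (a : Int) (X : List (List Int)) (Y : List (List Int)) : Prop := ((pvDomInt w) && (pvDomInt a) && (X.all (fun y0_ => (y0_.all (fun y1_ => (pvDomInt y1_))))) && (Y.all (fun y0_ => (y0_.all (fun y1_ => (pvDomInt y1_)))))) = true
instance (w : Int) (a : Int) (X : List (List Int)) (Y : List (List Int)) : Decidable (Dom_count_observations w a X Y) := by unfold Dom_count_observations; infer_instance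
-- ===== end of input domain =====

-- B builds a frequency table of (observation, state) pairs over zipped rows and reads the two
-- counts off the table (one lookup + one aggregation) instead of A's index-based double counting
-- loop; objective: idiomatic. Pre_ excludes the inputs where A raises IndexError (missing/short Y rows).


-- ===== PORT A =====
def count_observations (w : Int) (a : Int) (X : List (List Int)) (Y : List (List Int)) : Int × Int :=
  -- state s = (num, den)
  let s := (PySem.List.pyRange 0 (PySem.List.len X)).foldl (fun (s : Int × Int) i =>
    (PySem.List.pyRange 0 (PySem.List.len (PySem.List.pyGetD X i []))).foldl (fun (s : Int × Int) j =>
      match PySem.List.pyGet? (PySem.List.pyGetD Y i []) j with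
      | none => s  -- Python raises IndexError here; Pre_ excludes these inputs
      | some yij =>
        if yij == a then
          if PySem.List.pyGetD (PySem.List.pyGetD X i []) j 0 == w then (s.1 + 1, s.2 + 1)
          else (s.1, s.2 + 1)
        else s) s) ((0 : Int), (0 : Int))
  (s.1, s.2)

-- ===== PORT B =====
def count_observations_alt (w : Int) (a : Int) (X : List (List Int)) (Y : List (List Int)) : Int × Int :=
  let counts : PySem.Dict (Int × Int) Int :=
    (X.zip Y).foldl (fun d p =>
      (p.1.zip p.2).foldl (fun d q => d.insert q (d.getD q 0 + 1)) d) PySem.Dict.empty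
  let num := counts.getD (w, a) 0
  let den := counts.items.foldl (fun (s : Int) it => if it.1.2 == a then s + it.2 else s) 0
  (num, den)

-- ===== PRECONDITION & SPEC =====
-- Pre_ excludes exactly the inputs where A raises IndexError: some nonempty row X[i] has no
-- long-enough Y[i] counterpart (Y.getD i [] is [] past Y's end, so the bound covers both cases).
def Pre_count_observations (w : Int) (a : Int) (X : List (List Int)) (Y : List (List Int)) : Prop :=
  ∀ i : Nat, i < X.length → (X.getD i []).length ≤ (Y.getD i []).length
instance (w : Int) (a : Int) (X : List (List Int)) (Y : List (List Int)) : Decidable (Pre_count_observations w a X Y) := by unfold Pre_count_observations; infer_instance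
def pvWitness_count_observations : Int × Int × List (List Int) × List (List Int) := (1, 2, [[1, 3]], [[2, 2]])

def Spec_count_observations (w : Int) (a : Int) (X : List (List Int)) (Y : List (List Int)) (out : Int × Int) : Prop := out = count_observations_alt w a X Y
instance (w : Int) (a : Int) (X : List (List Int)) (Y : List (List Int)) (out : Int × Int) : Decidable (Spec_count_observations w a X Y out) := by unfold Spec_count_observations; infer_instance

-- ===== CLAIM (what is proved, stated in full; the proofs are below) =====
def Claim_equal_count_observations : Prop := ∀ (w : Int) (a : Int) (X : List (List Int)) (Y : List (List Int)), Dom_count_observations w a X Y → Pre_count_observations w a X Y → Spec_count_observations w a X Y (count_observations w a X Y)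

-- ===== LEMMAS AND PROOFS =====

-- the flattened list of (observation, state) pairs both programs effectively traverse
def pvPairs (X Y : List (List Int)) : List (Int × Int) :=
  (X.zip Y).flatMap (fun p => p.1.zip p.2)

-- Y padded with empty rows up to X's length: zipping with it flattens to the same pair list
def pvPad (X Y : List (List Int)) : List (List Int) :=
  Y ++ List.replicate (X.length - Y.length) []

theorem pvPad_getElem (X Y : List (List Int)) (n : Nat) (h : n < (pvPad X Y).length) :
    (pvPad X Y)[n] = Y.getD n [] := by
  unfold pvPad at *
  by_cases hn : n < Y.length
  · rw [List.getElem_append_left hn, List.getD_eq_getElem _ _ hn]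
  · rw [List.getElem_append_right (by omega), List.getElem_replicate,
      List.getD_eq_default _ _ (by omega)]

theorem pvGetD_int_eq_getD (Y : List (List Int)) (i : Int) (h0 : 0 ≤ i) :
    PySem.List.pyGetD Y i [] = Y.getD i.toNat [] := by
  have h := PySem.List.pyGetD_natCast Y i.toNat ([] : List Int)
  rw [show ((i.toNat : Nat) : Int) = i by omega] at h
  exact h

theorem zip_replicate_nil (X : List (List Int)) (n : Nat) :
    (X.zip (List.replicate n ([] : List Int))).flatMap (fun p => p.1.zip p.2) = [] := by
  induction X generalizing n with
  | nil => simp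
  | cons x xs ih =>
    cases n with
    | zero => simp
    | succ m => simp [List.replicate_succ, ih]

theorem pvPairs_pad (X Y : List (List Int)) : pvPairs X (pvPad X Y) = pvPairs X Y := by
  unfold pvPairs pvPad
  induction X generalizing Y with
  | nil => simp
  | cons x xs ih =>
    cases Y with
    | nil => simpa using zip_replicate_nil (x :: xs) (x :: xs).length
    | cons y ys => simp [List.flatMap_cons, ih ys]

theorem pvSumFilterCount (p : Int × Int → Bool) (S : List (Int × Int)) (hnd : S.Nodup) :
    ∀ (Q : List (Int × Int)), (∀ x ∈ Q, x ∈ S) →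
      ((S.filter p).map (fun k => ((Q.count k : Nat) : Int))).sum = (Q.countP p : Int) := by
  intro Q
  induction Q with
  | nil => intro _; simp
  | cons x Q ih =>
    intro hsub
    have hxS : x ∈ S := hsub x (by simp)
    have h1 : ((S.filter p).map (fun k => (((x :: Q).count k : Nat) : Int))).sum
        = ((S.filter p).map (fun k => ((Q.count k : Nat) : Int))).sum
          + ((S.filter p).map (fun k => if k == x then (1 : Int) else 0)).sum := by
      rw [← PySem.List.sum_map_add_int]
      apply congrArg
      apply List.map_congr_left
      intro k _
      rw [List.count_cons]; push_cast
      congr 1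
      rw [show (x == k) = (k == x) from by simp [BEq.comm]]
    have h2 : ((S.filter p).map (fun k => if k == x then (1 : Int) else 0)).sum
        = if p x then (1 : Int) else 0 := by
      rw [PySem.List.sum_map_ite_one_zero (fun k => k == x) (S.filter p)]
      have hc : (S.filter p).countP (fun k => k == x) = (S.filter p).count x := rfl
      rw [hc]
      by_cases hp : p x
      · rw [List.count_filter hp, List.count_eq_one_of_mem hnd hxS, if_pos hp]; rfl
      · rw [if_neg hp, List.count_eq_zero_of_not_mem]
        · rfl
        · simp [List.mem_filter, hp]
    rw [h1, h2, ih (fun y hy => hsub y (by simp [hy])), List.countP_cons]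
    push_cast
    split_ifs <;> simp

theorem pvB_eq (w a : Int) (X Y : List (List Int)) :
    count_observations_alt w a X Y =
      (((pvPairs X Y).count (w, a) : Int), ((pvPairs X Y).countP (fun q => q.2 == a) : Int)) := by
  unfold count_observations_alt
  have hcounts : (X.zip Y).foldl (fun d p =>
      (p.1.zip p.2).foldl (fun d q => d.insert q (d.getD q 0 + 1)) d) PySem.Dict.empty
      = PySem.Dict.counter (pvPairs X Y) := by
    rw [← PySem.Dict.foldl_insert_getD_add_one_eq_counter, pvPairs, List.foldl_flatMap]
  rw [hcounts]
  apply Prod.ext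
  · simp [PySem.Dict.getD_counter]
  · simp only
    rw [PySem.Dict.items_counter, List.foldl_map,
      PySem.List.foldl_if_eq_foldl_filter (fun k => k.2 == a)
        (fun (s : Int) k => s + ((pvPairs X Y).count k : Int)) (PySem.Set.ofList (pvPairs X Y)) 0]
    rw [PySem.List.foldl_add]
    rw [pvSumFilterCount (fun k => k.2 == a) _ (PySem.Set.nodup_ofList _) _
      (fun x hx => (PySem.Set.mem_ofList _ x).2 hx)]
    simp

theorem pvA_eq (w a : Int) (X Y : List (List Int)) (hpre : Pre_count_observations w a X Y) :
    count_observations w a X Y =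
      (((pvPairs X Y).count (w, a) : Int), ((pvPairs X Y).countP (fun q => q.2 == a) : Int)) := by
  unfold count_observations
  have hlenY' : X.length ≤ (pvPad X Y).length := by simp [pvPad]; omega
  have hlenZ : (X.zip (pvPad X Y)).length = X.length := by
    rw [List.length_zip]; omega
  -- the inner loop as a function of the row pair
  set g : (Int × Int) → (List Int × List Int) → (Int × Int) := fun s p =>
    (PySem.List.pyRange 0 (PySem.List.len p.1)).foldl (fun (s : Int × Int) j =>
      match PySem.List.pyGet? p.2 j with
      | none => s
      | some yij =>
        if yij == a then
          if PySem.List.pyGetD p.1 j 0 == w then (s.1 + 1, s.2 + 1)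
          else (s.1, s.2 + 1)
        else s) s with hg
  set h : (Int × Int) → (Int × Int) → (Int × Int) := fun s q =>
    if q.2 == a then
      if q.1 == w then (s.1 + 1, s.2 + 1) else (s.1, s.2 + 1)
    else s with hh
  have step1 : (PySem.List.pyRange 0 (PySem.List.len X)).foldl (fun (s : Int × Int) i =>
      (PySem.List.pyRange 0 (PySem.List.len (PySem.List.pyGetD X i []))).foldl (fun (s : Int × Int) j =>
        match PySem.List.pyGet? (PySem.List.pyGetD Y i []) j with
        | none => s
        | some yij =>
          if yij == a then
            if PySem.List.pyGetD (PySem.List.pyGetD X i []) j 0 == w then (s.1 + 1, s.2 + 1)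
            else (s.1, s.2 + 1)
          else s) s) ((0 : Int), (0 : Int))
      = (X.zip (pvPad X Y)).foldl g ((0 : Int), (0 : Int)) := by
    rw [PySem.List.foldl_congr_mem _ _
      (fun (s : Int × Int) (i : Int) => g s (PySem.List.pyGetD (X.zip (pvPad X Y)) i ([], []))) _
      ?_]
    · rw [show PySem.List.len X = PySem.List.len (X.zip (pvPad X Y)) by
        simp [PySem.List.len, hlenZ]]
      exact PySem.List.foldl_pyRange_pyGetD _ _ _ _ le_rfl
    · intro s i hi
      rw [PySem.List.mem_pyRange_one] at hi
      simp only [PySem.List.len] at hi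
      have hiX : i < (X.length : Int) := hi.2
      have h0 : (0:Int) ≤ i := hi.1
      have hiZ : i < ((X.zip (pvPad X Y)).length : Int) := by omega
      have hZ : PySem.List.pyGetD (X.zip (pvPad X Y)) i ([], [])
          = (X[i.toNat]'(by omega), Y.getD i.toNat []) := by
        rw [PySem.List.pyGetD_eq_getElem _ _ h0 hiZ, List.getElem_zip,
          pvPad_getElem X Y i.toNat (by omega)]
      have hX : PySem.List.pyGetD X i [] = X[i.toNat]'(by omega) :=
        PySem.List.pyGetD_eq_getElem _ _ h0 hiX
      have hY : PySem.List.pyGetD Y i [] = Y.getD i.toNat [] := pvGetD_int_eq_getD Y i h0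
      simp only [hg, hZ, hX, hY]
  rw [step1]
  have hZpre : ∀ p ∈ X.zip (pvPad X Y), p.1.length ≤ p.2.length := by
    intro p hp
    obtain ⟨n, hn, hget⟩ := List.getElem_of_mem hp
    rw [List.getElem_zip] at hget
    have hnX : n < X.length := by omega
    have := hpre n hnX
    rw [← hget]
    simp only
    rw [pvPad_getElem X Y n (by omega)]
    rwa [List.getD_eq_getElem _ _ hnX] at this
  have step2 : (X.zip (pvPad X Y)).foldl g ((0:Int), (0:Int))
      = (X.zip (pvPad X Y)).foldl (fun s p => (p.1.zip p.2).foldl h s) ((0:Int), (0:Int)) := by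
    apply PySem.List.foldl_congr_mem
    intro s p hp
    have hple := hZpre p hp
    simp only [hg]
    rw [PySem.List.foldl_congr_mem _ _
      (fun (s : Int × Int) (j : Int) => h s (PySem.List.pyGetD (p.1.zip p.2) j (0, 0))) _ ?_]
    · rw [show PySem.List.len p.1 = PySem.List.len (p.1.zip p.2) by
        simp [PySem.List.len, List.length_zip]; omega]
      exact PySem.List.foldl_pyRange_pyGetD _ _ _ _ le_rfl
    · intro s j hj
      rw [PySem.List.mem_pyRange_one] at hj
      simp only [PySem.List.len] at hj
      have h0 : (0:Int) ≤ j := hj.1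
      have hj1 : j < (p.1.length : Int) := hj.2
      have hj2 : j < (p.2.length : Int) := by
        have : (p.1.length : Int) ≤ (p.2.length : Int) := by exact_mod_cast hple
        omega
      have hq : PySem.List.pyGetD (p.1.zip p.2) j ((0:Int), (0:Int))
          = (p.1[j.toNat]'(by omega), p.2[j.toNat]'(by omega)) := by
        rw [PySem.List.pyGetD_eq_getElem _ _ h0 (by rw [List.length_zip]; push_cast; omega),
          List.getElem_zip]
      have h2 : PySem.List.pyGet? p.2 j = some (p.2[j.toNat]'(by omega)) :=
        PySem.List.pyGet?_eq_some_getElem _ h0 hj2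
      have h1 : PySem.List.pyGetD p.1 j 0 = p.1[j.toNat]'(by omega) :=
        PySem.List.pyGetD_eq_getElem _ _ h0 hj1
      simp only [h2, h1, hq, hh]
  rw [step2, ← List.foldl_flatMap,
    show (X.zip (pvPad X Y)).flatMap (fun p => p.1.zip p.2) = pvPairs X Y from pvPairs_pad X Y]
  simp only [Prod.mk.eta]
  have hstep : ∀ (s : Int × Int) (q : Int × Int), h s q
      = ((fun (acc : Int) (q : Int × Int) => if q == (w, a) then acc + 1 else acc) s.1 q,
         (fun (acc : Int) (q : Int × Int) => if q.2 == a then acc + 1 else acc) s.2 q) := by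
    intro s q
    obtain ⟨q1, q2⟩ := q
    simp only [hh]
    by_cases hc2 : q2 = a <;> by_cases hc1 : q1 = w <;>
      simp [hc1, hc2, Prod.ext_iff, beq_iff_eq]
  rw [PySem.List.foldl_congr_mem _ h _ _ (fun s q _ => hstep s q),
    PySem.List.foldl_prod_mk
      (f := fun (acc : Int) (q : Int × Int) => if q == (w, a) then acc + 1 else acc)
      (g := fun (acc : Int) (q : Int × Int) => if q.2 == a then acc + 1 else acc),
    PySem.List.foldl_beq_add_one, PySem.List.foldl_if_add_one]
  simp

-- ===== VERDICT (by name: the statement is the Claim_ definition above) =====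
theorem count_observations_spec : Claim_equal_count_observations := by
  intro w a X Y _ hpre
  unfold Spec_count_observations
  rw [pvA_eq w a X Y hpre, pvB_eq]
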